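-- pv_equiv track=rewrite | github.com/EphraiemSarabamoun/special-character-attack | src/attacks/encoding_attacks.py | rot_encode
-- ===== SOURCE A (Python) =====
-- def rot_encode(text: str, rotation: int = 13) -> str:
--     """Apply ROT encoding (default ROT13)"""
--     result = []
--     for char in text:
--         if char.isalpha():
--             base = ord('A') if char.isupper() else ord('a')
--             rotated = chr((ord(char) - base + rotation) % 26 + base)
--             result.append(rotated)
--         else:
--             result.append(char)
--     return ''.join(result)
-- ===== SOURCE B (Python) =====
-- def rot_encode(text: str, rotation: int = 13) -> str:
--     """Apply ROT encoding (default ROT13) via a precomputed translation table"""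
--     src = ''.join(chr(65 + i) for i in range(26)) + ''.join(chr(97 + i) for i in range(26))
--     dst = ''.join(chr(65 + (i + rotation) % 26) for i in range(26)) + \
--           ''.join(chr(97 + (i + rotation) % 26) for i in range(26))
--     return text.translate(str.maketrans(src, dst))
-- ===== Notes on version B (the rewrite author's own statement) =====
-- stated objective: idiomatic
-- what changed: B precomputes a full 52-entry codepoint-to-codepoint translation table (str.maketrans over both alphabets) once and applies text.translate, replacing A's per-character isalpha/isupper branching and modular arithmetic inside the loop
import Mathlib
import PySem

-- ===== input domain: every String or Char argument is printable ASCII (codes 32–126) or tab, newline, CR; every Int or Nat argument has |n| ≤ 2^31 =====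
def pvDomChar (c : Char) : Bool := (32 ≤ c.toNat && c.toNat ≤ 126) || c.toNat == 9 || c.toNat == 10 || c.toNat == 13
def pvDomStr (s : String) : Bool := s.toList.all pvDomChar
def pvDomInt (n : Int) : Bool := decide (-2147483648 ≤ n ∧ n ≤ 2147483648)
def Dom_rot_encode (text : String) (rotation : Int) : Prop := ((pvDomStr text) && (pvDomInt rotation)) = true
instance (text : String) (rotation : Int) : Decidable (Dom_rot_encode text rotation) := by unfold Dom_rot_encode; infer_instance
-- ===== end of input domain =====

-- B replaces A's per-character branch-and-arithmetic loop by a 52-entry precomputed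
-- translation table applied with str.translate (idiomatic; measurably faster by constant factor).

-- ===== PORT A =====
def rot_encode (text : String) (rotation : Int) : String :=
  String.mk (text.toList.foldl (fun (result : List Char) (char : Char) =>
    if PySem.Chars.isalpha char then
      let base : Int := if PySem.Chars.isupper char then 65 else 97
      result ++ [Char.ofNat ((PySem.Int.mod ((char.toNat : Int) - base + rotation) 26 + base).toNat)]
    else
      result ++ [char]) [])

-- ===== PORT B =====
-- the table str.maketrans(src, dst) builds: uppercase entries then lowercase entries
def rotTable (rotation : Int) : List (Char × Char) :=
  (List.range 26).map (fun i =>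
      (Char.ofNat (65 + i), Char.ofNat (65 + (PySem.Int.mod ((i : Int) + rotation) 26).toNat)))
  ++ (List.range 26).map (fun i =>
      (Char.ofNat (97 + i), Char.ofNat (97 + (PySem.Int.mod ((i : Int) + rotation) 26).toNat)))

-- text.translate(table): map each char through the table, absent chars pass through
def rot_encode_alt (text : String) (rotation : Int) : String :=
  String.mk (text.toList.map (fun c => ((rotTable rotation).lookup c).getD c))

-- ===== PRECONDITION & SPEC =====
def Spec_rot_encode (text : String) (rotation : Int) (out : String) : Prop := out = rot_encode_alt text rotation
instance (text : String) (rotation : Int) (out : String) : Decidable (Spec_rot_encode text rotation out) := by unfold Spec_rot_encode; infer_instance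

-- ===== CLAIM (what is proved, stated in full; the proofs are below) =====
def Claim_equal_rot_encode : Prop := ∀ (text : String) (rotation : Int), Dom_rot_encode text rotation → Spec_rot_encode text rotation (rot_encode text rotation)

-- ===== LEMMAS AND PROOFS =====

theorem char_eq_of_toNat_eq {a b : Char} (h : a.toNat = b.toNat) : a = b :=
  Char.ext (UInt32.toNat_inj.mp h)

theorem toNat_ofNat_small {n : Nat} (h : n < 55296) : (Char.ofNat n).toNat = n := by
  rw [Char.toNat_ofNat, if_pos (Or.inl h)]

theorem isupper_iff (c : Char) : PySem.Chars.isupper c = true ↔ 65 ≤ c.toNat ∧ c.toNat ≤ 90 := by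
  simp only [PySem.Chars.isupper, Bool.and_eq_true, decide_eq_true_eq, Char.le_def,
    UInt32.le_iff_toNat_le]
  exact Iff.rfl

theorem islower_iff (c : Char) : PySem.Chars.islower c = true ↔ 97 ≤ c.toNat ∧ c.toNat ≤ 122 := by
  simp only [PySem.Chars.islower, Bool.and_eq_true, decide_eq_true_eq, Char.le_def,
    UInt32.le_iff_toNat_le]
  exact Iff.rfl

-- lookup in a table keyed by consecutive codepoints b, b+1, …, b+n-1
theorem lookup_ofNat_range (val : Nat → Char) (b n : Nat) (hbn : b + n < 55296) (c : Char) :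
    List.lookup c ((List.range n).map (fun i => (Char.ofNat (b + i), val i))) =
      (if b ≤ c.toNat ∧ c.toNat < b + n then some (val (c.toNat - b)) else none) := by
  induction n with
  | zero =>
    rw [if_neg (by rintro ⟨h1, h2⟩; omega)]
    simp
  | succ n ih =>
    rw [List.range_succ, List.map_append, List.lookup_append, ih (by omega)]
    have hkeyNat : (Char.ofNat (b + n)).toNat = b + n := toNat_ofNat_small (by omega)
    by_cases hc : c.toNat = b + n
    · have hkey : c = Char.ofNat (b + n) := char_eq_of_toNat_eq (by omega)
      rw [if_neg (by rintro ⟨h1, h2⟩; omega), if_pos (by omega)]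
      simp [hkey]
      congr 1
      omega
    · have hne : (c == Char.ofNat (b + n)) = false := by
        apply beq_eq_false_iff_ne.mpr
        intro h; exact hc (by rw [h, hkeyNat])
      by_cases hin : b ≤ c.toNat ∧ c.toNat < b + n
      · rw [if_pos hin, if_pos (by omega)]
        rfl
      · rw [if_neg hin, if_neg (by rintro ⟨h1, h2⟩; exact hin ⟨h1, by omega⟩)]
        simp [hne]

theorem lookup_rotTable (rot : Int) (c : Char) :
    (rotTable rot).lookup c =
      (if 65 ≤ c.toNat ∧ c.toNat ≤ 90 then
        some (Char.ofNat (65 + (PySem.Int.mod (((c.toNat - 65 : Nat) : Int) + rot) 26).toNat))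
      else if 97 ≤ c.toNat ∧ c.toNat ≤ 122 then
        some (Char.ofNat (97 + (PySem.Int.mod (((c.toNat - 97 : Nat) : Int) + rot) 26).toNat))
      else none) := by
  unfold rotTable
  rw [List.lookup_append,
      lookup_ofNat_range (fun i => Char.ofNat (65 + (PySem.Int.mod ((i : Int) + rot) 26).toNat)) 65 26 (by omega) c,
      lookup_ofNat_range (fun i => Char.ofNat (97 + (PySem.Int.mod ((i : Int) + rot) 26).toNat)) 97 26 (by omega) c]
  by_cases h1 : 65 ≤ c.toNat ∧ c.toNat ≤ 90
  · rw [if_pos (by omega), if_pos h1]; rfl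
  · rw [if_neg (by rintro ⟨a, b⟩; exact h1 ⟨a, by omega⟩), if_neg h1]
    by_cases h2 : 97 ≤ c.toNat ∧ c.toNat ≤ 122
    · rw [if_pos (by omega), if_pos h2]; rfl
    · rw [if_neg (by rintro ⟨a, b⟩; exact h2 ⟨a, by omega⟩), if_neg h2]; rfl

-- the per-character agreement of A's branch arithmetic with B's table lookup
theorem char_step (rot : Int) (c : Char) :
    (if PySem.Chars.isalpha c then
      Char.ofNat ((PySem.Int.mod ((c.toNat : Int) - (if PySem.Chars.isupper c then (65 : Int) else 97) + rot) 26
        + (if PySem.Chars.isupper c then (65 : Int) else 97)).toNat)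
    else c) = (((rotTable rot).lookup c).getD c) := by
  rw [lookup_rotTable]
  by_cases h1 : 65 ≤ c.toNat ∧ c.toNat ≤ 90
  · have hu : PySem.Chars.isupper c = true := (isupper_iff c).mpr h1
    have ha : PySem.Chars.isalpha c = true := by
      simp [PySem.Chars.isalpha, hu]
    rw [if_pos ha, if_pos h1, hu, if_pos rfl]
    simp only [Option.getD_some]
    apply char_eq_of_toNat_eq
    have hcast : ((c.toNat - 65 : Nat) : Int) + rot = (c.toNat : Int) - 65 + rot := by omega
    rw [hcast]
    have hmn : 0 ≤ PySem.Int.mod ((c.toNat : Int) - 65 + rot) 26 := PySem.Int.mod_nonneg _ (by omega)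
    have hml : PySem.Int.mod ((c.toNat : Int) - 65 + rot) 26 < 26 := PySem.Int.mod_lt _ (by omega)
    rw [toNat_ofNat_small (by omega), toNat_ofNat_small (by omega)]
    omega
  · have hu : PySem.Chars.isupper c = false := by
      rcases Bool.eq_false_or_eq_true (PySem.Chars.isupper c) with h | h
      · exact absurd ((isupper_iff c).mp h) h1
      · exact h
    rw [if_neg h1]
    by_cases h2 : 97 ≤ c.toNat ∧ c.toNat ≤ 122
    · have hl : PySem.Chars.islower c = true := (islower_iff c).mpr h2
      have ha : PySem.Chars.isalpha c = true := by
        simp [PySem.Chars.isalpha, hl]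
      rw [if_pos ha, if_pos h2, hu]
      simp only [Bool.false_eq_true, if_false, Option.getD_some]
      apply char_eq_of_toNat_eq
      have hcast : ((c.toNat - 97 : Nat) : Int) + rot = (c.toNat : Int) - 97 + rot := by omega
      rw [hcast]
      have hmn : 0 ≤ PySem.Int.mod ((c.toNat : Int) - 97 + rot) 26 := PySem.Int.mod_nonneg _ (by omega)
      have hml : PySem.Int.mod ((c.toNat : Int) - 97 + rot) 26 < 26 := PySem.Int.mod_lt _ (by omega)
      rw [toNat_ofNat_small (by omega), toNat_ofNat_small (by omega)]
      omega
    · have hl : PySem.Chars.islower c = false := by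
        rcases Bool.eq_false_or_eq_true (PySem.Chars.islower c) with h | h
        · exact absurd ((islower_iff c).mp h) h2
        · exact h
      have ha : PySem.Chars.isalpha c = false := by
        simp [PySem.Chars.isalpha, hu, hl]
      rw [if_neg h2, ha]
      rfl

-- ===== VERDICT (by name: the statement is the Claim_ definition above) =====
theorem rot_encode_spec : Claim_equal_rot_encode := by
  intro text rotation _
  unfold Spec_rot_encode rot_encode rot_encode_alt
  have hbody : (fun (result : List Char) (char : Char) =>
      if PySem.Chars.isalpha char then
        let base : Int := if PySem.Chars.isupper char then 65 else 97
        result ++ [Char.ofNat ((PySem.Int.mod ((char.toNat : Int) - base + rotation) 26 + base).toNat)]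
      else
        result ++ [char])
    = (fun (result : List Char) (char : Char) =>
        result ++ [if PySem.Chars.isalpha char then
          Char.ofNat ((PySem.Int.mod ((char.toNat : Int) - (if PySem.Chars.isupper char then (65 : Int) else 97) + rotation) 26
            + (if PySem.Chars.isupper char then (65 : Int) else 97)).toNat)
        else char]) := by
    funext r ch
    by_cases h : PySem.Chars.isalpha ch = true <;> simp [h]
  rw [hbody, PySem.List.foldl_append_singleton_eq_map, List.nil_append]
  congr 1
  exact List.map_congr_left (fun c _ => char_step rotation c)
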